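-- pv_equiv track=rewrite | github.com/ChandanaReddy52/AgenticAI_Projects | Adaptive RAG/source/New folder/chunk_manual.py | build_chapter_text
-- ===== SOURCE A (Python) =====
-- CHAPTER_RANGES = {
--     "warranty_policy": (17, 24),
--     "safety_system": (32, 93),
--     "convenient_features": (94, 239),
--     "driving": (293, 363),
--     "emergency": (364, 392),
--     "maintenance": (393, 506),
--     "specifications": (507, 519),
-- }
--
-- def build_chapter_text(pages):
--     """
--     Returns dict: {chapter_name: full_text}
--     """
--     chapter_texts = {}
--
--     for chapter, (start, end) in CHAPTER_RANGES.items():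
--         collected = []
--         for p in range(start, end + 1):
--             if p in pages:
--                 collected.append(pages[p])
--         chapter_texts[chapter] = " ".join(collected).strip()
--
--     return chapter_texts
-- ===== SOURCE B (Python) =====
-- CHAPTER_RANGES = {
--     "warranty_policy": (17, 24),
--     "safety_system": (32, 93),
--     "convenient_features": (94, 239),
--     "driving": (293, 363),
--     "emergency": (364, 392),
--     "maintenance": (393, 506),
--     "specifications": (507, 519),
-- }
--
-- def build_chapter_text(pages):
--     """
--     Returns dict: {chapter_name: full_text}
--     """
--     index = {p: ch for ch, (s, e) in CHAPTER_RANGES.items() for p in range(s, e + 1)}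
--     texts = {ch: [] for ch in CHAPTER_RANGES}
--     for p in sorted(pages):
--         ch = index.get(p)
--         if ch is not None:
--             texts[ch].append(pages[p])
--     return {ch: " ".join(ws).strip() for ch, ws in texts.items()}
-- ===== Notes on version B (the rewrite author's own statement) =====
-- stated objective: alternative
-- what changed: B inverts the loop structure: instead of scanning every page number of every fixed chapter range and testing membership in pages, it builds a page->chapter lookup table once, initializes each chapter to an empty list, and makes a single pass over sorted(pages) appending each present page's text to its chapter.
import Mathlib
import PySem

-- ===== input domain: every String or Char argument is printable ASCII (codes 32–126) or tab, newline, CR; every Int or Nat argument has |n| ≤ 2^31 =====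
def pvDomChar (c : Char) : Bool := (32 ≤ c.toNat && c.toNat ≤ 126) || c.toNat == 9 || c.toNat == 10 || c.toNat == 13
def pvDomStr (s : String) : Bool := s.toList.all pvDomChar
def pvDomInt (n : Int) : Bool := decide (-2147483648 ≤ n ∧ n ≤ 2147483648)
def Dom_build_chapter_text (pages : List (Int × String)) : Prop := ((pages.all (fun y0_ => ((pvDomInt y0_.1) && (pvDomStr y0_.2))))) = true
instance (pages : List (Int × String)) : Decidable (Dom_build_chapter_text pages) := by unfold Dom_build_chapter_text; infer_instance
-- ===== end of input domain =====

-- B replaces A's scan of every fixed chapter range (membership test per page number) by a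
-- page->chapter lookup table and ONE pass over sorted(pages); alternative decomposition, not
-- claimed faster. Return-value equivalence only; neither program mutates its argument.

-- CHAPTER_RANGES (module constant), in insertion order.
def chapterRanges : List (String × Int × Int) :=
  [("warranty_policy", 17, 24), ("safety_system", 32, 93), ("convenient_features", 94, 239),
   ("driving", 293, 363), ("emergency", 364, 392), ("maintenance", 393, 506),
   ("specifications", 507, 519)]

-- ===== PORT A =====
-- 'p in pages' → contains; 'pages[p]' is only reached under that guard, so the total getD _ "" is exact there.
def build_chapter_text (pages : List (Int × String)) : List (String × String) :=
  let pagesD : PySem.Dict Int String := PySem.Dict.mk pages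
  (chapterRanges.foldl (fun ct cse =>
      let collected := (PySem.List.pyRange cse.2.1 (cse.2.2 + 1) 1).foldl
        (fun col p => if pagesD.contains p then col ++ [pagesD.getD p ""] else col) []
      ct.insert cse.1 (PySem.Str.strip (PySem.Str.join " " collected)))
    PySem.Dict.empty).items

-- ===== PORT B =====
-- sorted(pages) iterates the dict's keys in ascending order; 'pages[p]' with p a key of pages,
-- so the total getD _ "" is exact there.
def build_chapter_text_alt (pages : List (Int × String)) : List (String × String) :=
  let pagesD : PySem.Dict Int String := PySem.Dict.mk pages
  let index : PySem.Dict Int String := chapterRanges.foldl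
      (fun idx cse => (PySem.List.pyRange cse.2.1 (cse.2.2 + 1) 1).foldl
        (fun idx p => idx.insert p cse.1) idx)
      PySem.Dict.empty
  let texts0 : PySem.Dict String (List String) :=
    chapterRanges.foldl (fun t cse => t.insert cse.1 ([] : List String)) PySem.Dict.empty
  let texts := (PySem.List.sorted (pages.map Prod.fst) (fun x => x)).foldl
      (fun t p => match index.get? p with
        | some ch => t.modify ch [] (fun l => l ++ [pagesD.getD p ""])
        | none => t) texts0
  texts.items.map (fun cv => (cv.1, PySem.Str.strip (PySem.Str.join " " cv.2)))

-- ===== PRECONDITION & SPEC =====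
-- pages stands for a Python dict; Pre_ excludes association lists with duplicate page keys,
-- which represent no dict A can receive (first-vs-last lookup there is a representation artefact).
def Pre_build_chapter_text (pages : List (Int × String)) : Prop := (pages.map Prod.fst).Nodup
instance (pages : List (Int × String)) : Decidable (Pre_build_chapter_text pages) := by
  unfold Pre_build_chapter_text; infer_instance
def pvWitness_build_chapter_text : (List (Int × String)) := [(17, "hello"), (20, "world"), (600, "x")]

def Spec_build_chapter_text (pages : List (Int × String)) (out : List (String × String)) : Prop := out = build_chapter_text_alt pages
instance (pages : List (Int × String)) (out : List (String × String)) : Decidable (Spec_build_chapter_text pages out) := by unfold Spec_build_chapter_text; infer_instance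

-- ===== CLAIM (what is proved, stated in full; the proofs are below) =====
def Claim_equal_build_chapter_text : Prop := ∀ (pages : List (Int × String)), Dom_build_chapter_text pages → Pre_build_chapter_text pages → Spec_build_chapter_text pages (build_chapter_text pages)

-- ===== LEMMAS AND PROOFS =====

-- the pages selected by A for chapter range [s,e]: scan the range, keep the keys of pages
def pickedA (pages : List (Int × String)) (s e : Int) : List Int :=
  (PySem.List.pyRange s (e + 1) 1).filter (fun p => (PySem.Dict.mk pages).contains p)

-- the pages selected by B for chapter range [s,e]: scan the sorted keys, keep those in range
def pickedB (pages : List (Int × String)) (s e : Int) : List Int :=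
  (PySem.List.sorted (pages.map Prod.fst) (fun x => x)).filter (fun p => decide (s ≤ p ∧ p ≤ e))

-- B's page->chapter index (the closed constant B's 'index' let-binding computes)
def idxD : PySem.Dict Int String :=
  chapterRanges.foldl
    (fun idx cse => (PySem.List.pyRange cse.2.1 (cse.2.2 + 1) 1).foldl
      (fun idx p => idx.insert p cse.1) idx)
    PySem.Dict.empty

-- closed form of idxD.get?
def idxFun (q : Int) : Option String :=
  if 17 ≤ q ∧ q ≤ 24 then some "warranty_policy"
  else if 32 ≤ q ∧ q ≤ 93 then some "safety_system"
  else if 94 ≤ q ∧ q ≤ 239 then some "convenient_features"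
  else if 293 ≤ q ∧ q ≤ 363 then some "driving"
  else if 364 ≤ q ∧ q ≤ 392 then some "emergency"
  else if 393 ≤ q ∧ q ≤ 506 then some "maintenance"
  else if 507 ≤ q ∧ q ≤ 519 then some "specifications"
  else none

theorem insertRange_get? (c : String) (e : Int) :
    ∀ (n : Nat) (s : Int), (e + 1 - s).toNat = n → ∀ (d : PySem.Dict Int String) (q : Int),
      ((PySem.List.pyRange s (e + 1) 1).foldl (fun d p => d.insert p c) d).get? q
        = if s ≤ q ∧ q ≤ e then some c else d.get? q := by
  intro n
  induction n with
  | zero =>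
    intro s hs d q
    rw [PySem.List.pyRange_one_eq_nil (by omega)]
    simp only [List.foldl_nil]
    rw [if_neg (by omega)]
  | succ n ih =>
    intro s hs d q
    rw [PySem.List.pyRange_one_cons (by omega)]
    simp only [List.foldl_cons]
    rw [ih (s + 1) (by omega) (d.insert s c) q, PySem.Dict.get?_insert]
    split_ifs <;> first | rfl | omega

theorem idx_get? (q : Int) : idxD.get? q = idxFun q := by
  simp only [idxD, chapterRanges, List.foldl_cons, List.foldl_nil]
  rw [insertRange_get? _ _ _ _ rfl, insertRange_get? _ _ _ _ rfl, insertRange_get? _ _ _ _ rfl,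
      insertRange_get? _ _ _ _ rfl, insertRange_get? _ _ _ _ rfl, insertRange_get? _ _ _ _ rfl,
      insertRange_get? _ _ _ _ rfl]
  simp only [idxFun, PySem.Dict.get?_empty]
  split_ifs <;> first | rfl | omega

theorem idxFun_mem_names {q : Int} {c : String} (h : idxFun q = some c) :
    c ∈ chapterRanges.map Prod.fst := by
  unfold idxFun at h
  split_ifs at h <;> simp_all [chapterRanges]

-- A's inner loop over a range, as filter+map
theorem A_map (pages : List (Int × String)) :
    build_chapter_text pages
      = chapterRanges.map (fun cse => (cse.1, PySem.Str.strip (PySem.Str.join " "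
          ((pickedA pages cse.2.1 cse.2.2).map (fun p => (PySem.Dict.mk pages).getD p ""))))) := by
  unfold build_chapter_text
  rw [PySem.Dict.items_foldl_insert_fresh chapterRanges Prod.fst
        (fun cse => PySem.Str.strip (PySem.Str.join " "
          ((PySem.List.pyRange cse.2.1 (cse.2.2 + 1) 1).foldl
            (fun col p => if (PySem.Dict.mk pages).contains p
              then col ++ [(PySem.Dict.mk pages).getD p ""] else col) [])))
        PySem.Dict.empty (by intro a _; simp [PySem.Dict.contains_empty]) (by decide)]
  rw [show (PySem.Dict.empty : PySem.Dict String String).items = [] from rfl, List.nil_append]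
  apply List.map_congr_left
  intro cse _
  rw [PySem.List.foldl_append_if]
  rfl

-- B's main loop, rewritten as a fold over the (chapter, text) pairs it actually appends
theorem loop_filterMap (F : Int → Option String) (val : Int → String) :
    ∀ (ks : List Int) (t : PySem.Dict String (List String)),
      ks.foldl (fun t p => match F p with
          | some ch => t.modify ch [] (fun l => l ++ [val p])
          | none => t) t
        = (ks.filterMap (fun p => (F p).map (fun ch => (ch, val p)))).foldl
            (fun t q => t.modify q.1 [] (fun l => l ++ [q.2])) t := by
  intro ks
  induction ks with
  | nil => intro t; rfl
  | cons p ks ih =>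
    intro t
    cases h : F p <;> simp [h, ih]

theorem set_update_self {s : PySem.Set String} :
    ∀ {l : List String}, (∀ x ∈ l, x ∈ s) → PySem.Set.update s l = s := by
  intro l
  induction l generalizing s with
  | nil => intro _; rfl
  | cons x l ih =>
    intro h
    have hx : PySem.Set.add s x = s := PySem.Set.add_of_mem (h x (by simp))
    simp only [PySem.Set.update, List.foldl_cons, hx]
    exact ih (fun y hy => h y (by simp [hy]))

-- an association list with distinct keys is determined by its keys and its lookups
theorem assoc_items : ∀ (l : List (String × List String)), (l.map Prod.fst).Nodup →
    l = (l.map Prod.fst).map (fun k => (k, (PySem.Dict.mk l).getD k [])) := by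
  intro l
  induction l with
  | nil => intro _; rfl
  | cons kv rest ih =>
    intro h
    obtain ⟨k, v⟩ := kv
    simp only [List.map_cons, List.map_map]
    have hk : (PySem.Dict.mk ((k, v) :: rest)).getD k [] = v := by
      rw [PySem.Dict.getD_eq_get?_getD, PySem.Dict.get?_mk_cons]
      simp
    have hne : ∀ x ∈ rest.map Prod.fst, (PySem.Dict.mk ((k, v) :: rest)).getD x []
        = (PySem.Dict.mk rest).getD x [] := by
      intro x hx
      rw [PySem.Dict.getD_eq_get?_getD, PySem.Dict.get?_mk_cons, PySem.Dict.getD_eq_get?_getD]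
      have : k ≠ x := by
        intro hkx; subst hkx
        exact (List.nodup_cons.mp h).1 hx
      simp [this]
    rw [hk]
    congr 1
    have h' := (List.nodup_cons.mp h).2
    conv_lhs => rw [ih h']
    rw [List.map_map]
    apply List.map_congr_left
    intro x hx
    simp only [Function.comp_apply]
    rw [hne x.1 (List.mem_map_of_mem hx)]
  
-- the filtered appended pairs for one chapter, given the closed range of that chapter
theorem contrib (val : Int → String) (c : String) (s e : Int)
    (hiff : ∀ p : Int, idxFun p = some c ↔ (s ≤ p ∧ p ≤ e)) :
    ∀ ks : List Int,
      ((ks.filterMap (fun p => (idxFun p).map (fun ch => (ch, val p)))).filter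
          (fun q => q.1 == c)).map Prod.snd
        = (ks.filter (fun p => decide (s ≤ p ∧ p ≤ e))).map val := by
  intro ks
  induction ks with
  | nil => rfl
  | cons p ks ih =>
    cases h : idxFun p with
    | none =>
      have : ¬ (s ≤ p ∧ p ≤ e) := by
        intro hc
        rw [← hiff p] at hc
        simp [h] at hc
      simp [h, this, ih]
    | some ch =>
      by_cases hc : ch = c
      · subst hc
        have := (hiff p).mp h
        simp [h, this, ih]
      · have : ¬ (s ≤ p ∧ p ≤ e) := by
          intro hrange
          exact hc (Option.some_injective _ ((h.symm.trans ((hiff p).mpr hrange))))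
        simp [h, hc, this, ih]

set_option maxHeartbeats 2000000 in
theorem B_map (pages : List (Int × String)) :
    build_chapter_text_alt pages
      = chapterRanges.map (fun cse => (cse.1, PySem.Str.strip (PySem.Str.join " "
          ((pickedB pages cse.2.1 cse.2.2).map (fun p => (PySem.Dict.mk pages).getD p ""))))) := by
  unfold build_chapter_text_alt
  simp only []
  rw [show (chapterRanges.foldl
      (fun idx cse => (PySem.List.pyRange cse.2.1 (cse.2.2 + 1) 1).foldl
        (fun idx p => idx.insert p cse.1) idx)
      PySem.Dict.empty) = idxD from rfl]
  rw [loop_filterMap (fun p => idxD.get? p) (fun p => (PySem.Dict.mk pages).getD p "")]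
  -- name the pieces
  set ks := PySem.List.sorted (pages.map Prod.fst) (fun x => x) with hks
  set pairs := ks.filterMap (fun p => (idxD.get? p).map
      (fun ch => (ch, (PySem.Dict.mk pages).getD p ""))) with hpairs
  set texts0 : PySem.Dict String (List String) :=
    chapterRanges.foldl (fun t cse => t.insert cse.1 ([] : List String)) PySem.Dict.empty
    with htexts0
  set texts := pairs.foldl (fun t q => t.modify q.1 [] (fun l => l ++ [q.2])) texts0 with htexts
  -- texts0 explicitly
  have h0items : texts0.items = chapterRanges.map (fun cse => (cse.1, ([] : List String))) := by
    rw [htexts0, PySem.Dict.items_foldl_insert_fresh chapterRanges Prod.fst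
        (fun _ => ([] : List String)) PySem.Dict.empty
        (by intro a _; simp [PySem.Dict.contains_empty]) (by decide)]
    simp [PySem.Dict.empty]
  have h0keys : texts0.keys = chapterRanges.map Prod.fst := by
    simp only [PySem.Dict.keys, h0items, List.map_map]; rfl
  have h0getD : ∀ cse ∈ chapterRanges, texts0.getD cse.1 [] = [] := by
    intro cse hm
    exact PySem.Dict.getD_of_mem_items texts0
      (by rw [h0items]; exact List.mem_map_of_mem hm)
      (by rw [h0keys]; decide) []
  -- keys of the final dict
  have hpairs_fst : ∀ q ∈ pairs, q.1 ∈ texts0.keys := by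
    intro q hq
    rw [hpairs] at hq
    obtain ⟨p, _, hp⟩ := List.mem_filterMap.mp hq
    simp only [idx_get?] at hp
    cases hg : idxFun p with
    | none => rw [hg] at hp; simp at hp
    | some ch =>
      rw [hg] at hp
      simp only [Option.map_some] at hp
      obtain rfl := Option.some.inj hp
      rw [h0keys]
      exact idxFun_mem_names hg
  have hkeys : texts.keys = chapterRanges.map Prod.fst := by
    rw [htexts, PySem.Dict.keys_foldl_modify_key pairs Prod.fst [] (fun _ q _ => _ ++ [q.2]) texts0]
    rw [set_update_self (by intro x hx
                            obtain ⟨q, hq, rfl⟩ := List.mem_map.mp hx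
                            exact hpairs_fst q hq), h0keys]
  have hkeysnodup : texts.keys.Nodup := by rw [hkeys]; decide
  -- value at each chapter
  have hgetD : ∀ c : String, texts.getD c [] = texts0.getD c []
      ++ (pairs.filter (fun q => q.1 == c)).map Prod.snd := by
    intro c
    rw [htexts]
    exact PySem.Dict.getD_foldl_modify_append pairs texts0 c
  -- items of the final dict from its keys and lookups
  have hitems : texts.items = (chapterRanges.map Prod.fst).map (fun k => (k, texts.getD k [])) := by
    have := assoc_items texts.items (by
      have : texts.items.map Prod.fst = texts.keys := rfl
      rw [this]; exact hkeysnodup)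
    have hmk : PySem.Dict.mk texts.items = texts := rfl
    rw [hmk] at this
    have hkeys' : texts.items.map Prod.fst = chapterRanges.map Prod.fst := hkeys
    rw [hkeys'] at this
    exact this
  rw [hitems]
  simp only [List.map_map]
  apply List.map_congr_left
  intro cse hm
  simp only [Function.comp_apply]
  have hrw : ks.filterMap (fun p => (idxD.get? p).map
      (fun ch => (ch, (PySem.Dict.mk pages).getD p "")))
      = ks.filterMap (fun p => (idxFun p).map
      (fun ch => (ch, (PySem.Dict.mk pages).getD p ""))) := by
    apply List.filterMap_congr
    intro p _
    rw [idx_get?]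
  -- per-chapter: the appended texts are the in-range sorted keys' texts
  have hlist : ((ks.filterMap (fun p => (idxFun p).map
        (fun ch => (ch, (PySem.Dict.mk pages).getD p "")))).filter
        (fun q => q.1 == cse.1)).map Prod.snd
      = (pickedB pages cse.2.1 cse.2.2).map (fun p => (PySem.Dict.mk pages).getD p "") := by
    rw [pickedB]
    have hm' : cse = ("warranty_policy", (17:Int), (24:Int)) ∨ cse = ("safety_system", 32, 93) ∨
        cse = ("convenient_features", 94, 239) ∨ cse = ("driving", 293, 363) ∨
        cse = ("emergency", 364, 392) ∨ cse = ("maintenance", 393, 506) ∨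
        cse = ("specifications", 507, 519) := by
      simpa [chapterRanges] using hm
    rcases hm' with rfl | rfl | rfl | rfl | rfl | rfl | rfl <;>
      exact contrib (fun p => (PySem.Dict.mk pages).getD p "") _ _ _
        (by intro p; unfold idxFun; split_ifs <;> simp_all <;> omega) ks
  rw [hgetD, h0getD cse hm, List.nil_append, hpairs, hrw, hlist]

-- the two selections agree: both list, in ascending order, the keys of pages lying in [s,e]
theorem picked_eq (pages : List (Int × String)) (hnd : (pages.map Prod.fst).Nodup)
    (s e : Int) : pickedB pages s e = pickedA pages s e := by
  have hperm : (PySem.List.sorted (pages.map Prod.fst) (fun x => x)).Perm (pages.map Prod.fst) :=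
    PySem.List.sorted_perm _ _ _
  have hsortnd : (PySem.List.sorted (pages.map Prod.fst) (fun x => x)).Nodup :=
    hperm.nodup_iff.mpr hnd
  have hsortlt : (PySem.List.sorted (pages.map Prod.fst) (fun x => x)).Pairwise (· < ·) := by
    have hle := PySem.List.sorted_pairwise (pages.map Prod.fst) (fun x => x)
    exact (hle.and hsortnd).imp (fun h => lt_of_le_of_ne h.1 h.2)
  have hAlt : (pickedA pages s e).Pairwise (· < ·) :=
    (PySem.List.pairwise_lt_pyRange_one s (e + 1)).filter _
  have hBlt : (pickedB pages s e).Pairwise (· < ·) := hsortlt.filter _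
  have hAnd : (pickedA pages s e).Nodup := hAlt.imp (fun h => ne_of_lt h)
  have hBnd : (pickedB pages s e).Nodup := hBlt.imp (fun h => ne_of_lt h)
  have hmem : ∀ q : Int, q ∈ pickedA pages s e ↔ q ∈ pickedB pages s e := by
    intro q
    simp only [pickedA, pickedB, List.mem_filter, PySem.List.mem_pyRange_one,
      PySem.List.mem_sorted, decide_eq_true_eq]
    rw [PySem.Dict.contains_iff_mem_keys]
    have hkeys : (PySem.Dict.mk pages).keys = pages.map Prod.fst := rfl
    rw [hkeys]
    constructor
    · rintro ⟨⟨h1, h2⟩, h3⟩; exact ⟨h3, h1, by omega⟩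
    · rintro ⟨h3, h1, h2⟩; exact ⟨⟨h1, by omega⟩, h3⟩
  have hperm2 : (pickedA pages s e).Perm (pickedB pages s e) :=
    (List.perm_ext_iff_of_nodup hAnd hBnd).mpr hmem
  have h1 : PySem.List.sorted (pickedB pages s e) (fun x => x) = pickedA pages s e :=
    PySem.List.sorted_eq_of_perm_of_pairwise_lt _ _ _ hperm2 hAlt
  have h2 : PySem.List.sorted (pickedB pages s e) (fun x => x) = pickedB pages s e :=
    PySem.List.sorted_eq_self_of_pairwise _ _ (hBlt.imp le_of_lt)
  rw [← h1, h2]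

-- ===== VERDICT (by name: the statement is the Claim_ definition above) =====
theorem build_chapter_text_spec : Claim_equal_build_chapter_text := by
  intro pages _ hpre
  unfold Spec_build_chapter_text
  rw [A_map, B_map]
  apply List.map_congr_left
  intro cse _
  rw [picked_eq pages hpre]
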